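-- pv_equiv track=rewrite | github.com/evafigueiredo8/l3ateliers | atelier3_ex1.py | full_name2
-- ===== SOURCE A (Python) =====
-- def full_name2(str_arg:str)->str:
--     borne_min = 97
--     borne_max = 122
--     nom_majuscule = ""
--     prenom = ""
--     est_nom = True
--     for caractere in str_arg:
--         ascii_caractere = ord(caractere)
--         if caractere == ' ':
--             est_nom = False
--             est_prenom = True
--         elif est_nom:
--             if ascii_caractere >= borne_min and ascii_caractere <= borne_max:
--                 nom_majuscule += chr(ascii_caractere - 32)
--             else:
--                 nom_majuscule += caractere
--         elif est_prenom == True: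
--             if ascii_caractere >= borne_min and ascii_caractere <= borne_max:
--                 prenom = chr(ascii_caractere - 32)
--             else:
--                 prenom = caractere
--             est_prenom = False
--         elif prenom != "":
--                 prenom += caractere
--     return f"{nom_majuscule} {prenom}"
-- ===== SOURCE B (Python) =====
-- def full_name2(str_arg: str) -> str:
--     def up(c):
--         return chr(ord(c) - 32) if 'a' <= c <= 'z' else c
--     parts = str_arg.split(' ')
--     nom = ''.join(up(c) for c in parts[0])
--     prenom = ''
--     for tok in parts[1:]:
--         if tok:
--             prenom = tok
--     if prenom:
--         prenom = up(prenom[0]) + prenom[1:]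
--     return nom + ' ' + prenom
-- ===== Notes on version B (the rewrite author's own statement) =====
-- stated objective: simpler
-- what changed: Replaces A's single pass driven by est_nom/est_prenom flags with a split-on-space decomposition: ASCII-uppercase the first piece as the surname, pick the last non-empty remaining token and capitalize its first character as the firstname.
import Mathlib
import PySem

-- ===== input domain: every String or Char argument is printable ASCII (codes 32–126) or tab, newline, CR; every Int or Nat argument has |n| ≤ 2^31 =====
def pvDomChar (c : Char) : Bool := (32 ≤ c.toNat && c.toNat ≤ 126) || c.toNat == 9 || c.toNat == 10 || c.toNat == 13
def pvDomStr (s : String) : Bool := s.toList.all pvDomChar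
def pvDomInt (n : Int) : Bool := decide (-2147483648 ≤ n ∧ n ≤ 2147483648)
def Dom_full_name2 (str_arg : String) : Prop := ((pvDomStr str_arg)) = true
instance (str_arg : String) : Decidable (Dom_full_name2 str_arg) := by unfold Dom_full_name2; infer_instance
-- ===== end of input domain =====

-- B replaces A's flag-driven single pass by a split-on-space / last-non-empty-token decomposition (same cost, simpler shape).


-- ===== PORT A =====
-- state = (nom_majuscule, prenom, est_nom, est_prenom); in Python est_prenom starts
-- unbound and is never read before a space assigns it, so the initial 'false' is arbitrary.
def pvStepA (st : List Char × List Char × Bool × Bool) (c : Char) :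
    List Char × List Char × Bool × Bool :=
  let nom := st.1; let prenom := st.2.1; let est_nom := st.2.2.1; let est_prenom := st.2.2.2
  if c = ' ' then (nom, prenom, false, true)
  else if est_nom then
    (nom ++ [if 97 ≤ c.toNat ∧ c.toNat ≤ 122 then Char.ofNat (c.toNat - 32) else c],
     prenom, est_nom, est_prenom)
  else if est_prenom then
    (nom, [if 97 ≤ c.toNat ∧ c.toNat ≤ 122 then Char.ofNat (c.toNat - 32) else c],
     est_nom, false)
  else if prenom ≠ [] then (nom, prenom ++ [c], est_nom, est_prenom)
  else st

def full_name2 (str_arg : String) : String :=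
  let st := str_arg.toList.foldl pvStepA ([], [], true, false)
  String.ofList (st.1 ++ ' ' :: st.2.1)

-- ===== PORT B =====
-- ASCII-only uppercase of one character (Source B's 'up')
def pvUp (c : Char) : Char :=
  if 97 ≤ c.toNat ∧ c.toNat ≤ 122 then Char.ofNat (c.toNat - 32) else c

-- Source B's "up(prenom[0]) + prenom[1:]" guarded by "if prenom:"
def pvCap : List Char → List Char
  | [] => []
  | c :: r => pvUp c :: r

def full_name2_alt (str_arg : String) : String :=
  let parts := str_arg.toList.splitOn ' '   -- str.split(' ') keeps empty pieces, exactly List.splitOn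
  let nom := (parts.headD []).map pvUp
  let prenom := parts.tail.foldl (fun p t => if t ≠ [] then t else p) []
  String.ofList (nom ++ ' ' :: pvCap prenom)

-- ===== PRECONDITION & SPEC =====
def Spec_full_name2 (str_arg : String) (out : String) : Prop := out = full_name2_alt str_arg
instance (str_arg : String) (out : String) : Decidable (Spec_full_name2 str_arg out) := by unfold Spec_full_name2; infer_instance

-- ===== CLAIM (what is proved, stated in full; the proofs are below) =====
def Claim_equal_full_name2 : Prop := ∀ (str_arg : String), Dom_full_name2 str_arg → Spec_full_name2 str_arg (full_name2 str_arg)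

-- ===== LEMMAS AND PROOFS =====

lemma pvCap_ne_nil {t : List Char} (h : t ≠ []) : pvCap t ≠ [] := by
  cases t with
  | nil => exact absurd rfl h
  | cons c r => simp [pvCap]

lemma pvCap_append {t : List Char} (h : t ≠ []) (u : List Char) :
    pvCap (t ++ u) = pvCap t ++ u := by
  cases t with
  | nil => exact absurd rfl h
  | cons c r => simp [pvCap]

lemma pv_splitOn_cons_sep (l : List Char) : (' ' :: l).splitOn ' ' = [] :: l.splitOn ' ' := by
  simp [List.splitOn, List.splitOnP_cons]

lemma pv_splitOn_cons_ne {c : Char} (h : c ≠ ' ') (l : List Char) :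
    (c :: l).splitOn ' ' = (l.splitOn ' ').modifyHead (c :: ·) := by
  simp [List.splitOn, List.splitOnP_cons, h]

lemma pv_splitOn_ne_nil (l : List Char) : l.splitOn ' ' ≠ [] := by
  simp [List.splitOn]; exact List.splitOnP_ne_nil _ _

-- Phase 2 of A (after the first space): the resulting prenom is the capitalized
-- last non-empty token of the remainder; the surname accumulator never changes.
lemma pv_phase2 (l : List Char) :
    (∀ (nom : List Char) (p : List Char),
       (l.foldl pvStepA (nom, pvCap p, false, true)).1 = nom ∧
       (l.foldl pvStepA (nom, pvCap p, false, true)).2.1 =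
         pvCap ((l.splitOn ' ').foldl (fun q t => if t ≠ [] then t else q) p)) ∧
    (∀ (nom : List Char) (t : List Char), t ≠ [] →
       (l.foldl pvStepA (nom, pvCap t, false, false)).1 = nom ∧
       (l.foldl pvStepA (nom, pvCap t, false, false)).2.1 =
         pvCap ((l.splitOn ' ').tail.foldl (fun q t => if t ≠ [] then t else q)
                  (t ++ (l.splitOn ' ').headD []))) := by
  induction l with
  | nil =>
      constructor
      · intro nom p; simp [List.splitOn]
      · intro nom t ht; simp [List.splitOn]
  | cons c l ih =>
      by_cases hc : c = ' '
      · subst hc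
        constructor
        · intro nom p
          have h1 := (ih.1 nom p)
          simpa [pvStepA, pv_splitOn_cons_sep] using h1
        · intro nom t ht
          have h1 := (ih.1 nom t)
          simpa [pvStepA, pv_splitOn_cons_sep] using h1
      · obtain ⟨h, r, hsp⟩ : ∃ h r, l.splitOn ' ' = h :: r := by
          cases hl : l.splitOn ' ' with
          | nil => exact absurd hl (pv_splitOn_ne_nil l)
          | cons h r => exact ⟨h, r, rfl⟩
        have hmod : (c :: l).splitOn ' ' = (c :: h) :: r := by
          rw [pv_splitOn_cons_ne hc, hsp]; rfl
        constructor
        · intro nom p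
          have h2 := (ih.2 nom [c] (by simp))
          rw [hsp] at h2
          simpa [pvStepA, hc, hmod, pvUp, pvCap] using h2
        · intro nom t ht
          have h2 := (ih.2 nom (t ++ [c]) (by simp))
          rw [hsp] at h2
          have hcapne := pvCap_ne_nil ht
          simpa [pvStepA, hc, hcapne, pvCap_append ht, hmod] using h2

-- Phase 1 of A (before the first space): nom is the uppercased first split piece.
lemma pv_phase1 (l : List Char) : ∀ (acc : List Char),
    (l.foldl pvStepA (acc, [], true, false)).1 =
      acc ++ ((l.splitOn ' ').headD []).map pvUp ∧
    (l.foldl pvStepA (acc, [], true, false)).2.1 =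
      pvCap ((l.splitOn ' ').tail.foldl (fun q t => if t ≠ [] then t else q) []) := by
  induction l with
  | nil => intro acc; simp [List.splitOn, pvCap]
  | cons c l ih =>
      intro acc
      by_cases hc : c = ' '
      · subst hc
        have h1 := (pv_phase2 l).1 acc ([] : List Char)
        simp only [pvCap] at h1
        simpa [pvStepA, pv_splitOn_cons_sep] using h1
      · obtain ⟨h, r, hsp⟩ : ∃ h r, l.splitOn ' ' = h :: r := by
          cases hl : l.splitOn ' ' with
          | nil => exact absurd hl (pv_splitOn_ne_nil l)
          | cons h r => exact ⟨h, r, rfl⟩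
        have hmod : (c :: l).splitOn ' ' = (c :: h) :: r := by
          rw [pv_splitOn_cons_ne hc, hsp]; rfl
        have h1 := ih (acc ++ [pvUp c])
        rw [hsp] at h1
        simpa [pvStepA, hc, hmod, pvUp] using h1

-- ===== VERDICT (by name: the statement is the Claim_ definition above) =====
theorem full_name2_spec : Claim_equal_full_name2 := by
  intro s _
  unfold Spec_full_name2 full_name2 full_name2_alt
  have h := pv_phase1 s.toList []
  simp only [List.nil_append] at h
  dsimp only
  rw [h.1, h.2]
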